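-- pv_equiv track=rewrite | github.com/anuaruddin/processs-tree-based-anomaly-detection | ptsim_lib2.py | levenshtein_ori
-- ===== SOURCE A (Python) =====
-- def levenshtein_ori(s1, s2):
--     n = len(s1)
--     m = len(s2)
--
--     dp = [[0] * (m + 1) for _ in range(n + 1)]
--
--     for i in range(n + 1):
--         dp[i][0] = i
--
--     for j in range(m + 1):
--         dp[0][j] = j
--
--     for i in range(1, n + 1):
--         for j in range(1, m + 1):
--           if s1[i - 1] == 'tau' or s2[j - 1] == 'tau':
--             cost = 0
--           else:
--             cost = 0 if s1[i - 1] == s2[j - 1] else 1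
--             dp[i][j] = min(dp[i - 1][j] + 1,         # insertion
--                            dp[i][j - 1] + 1,         # deletion
--                            dp[i - 1][j - 1] + cost)  # replacement
--     return dp[n][m]
-- ===== SOURCE B (Python) =====
-- def levenshtein_ori(s1, s2):
--     memo = {}
--
--     def f(i, j):
--         if i == 0:
--             return j
--         if j == 0:
--             return i
--         key = (i, j)
--         if key in memo:
--             return memo[key]
--         if s1[i - 1] == 'tau' or s2[j - 1] == 'tau':
--             r = 0
--         else:
--             cost = 0 if s1[i - 1] == s2[j - 1] else 1
--             r = min(f(i - 1, j) + 1,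
--                     f(i, j - 1) + 1,
--                     f(i - 1, j - 1) + cost)
--         memo[key] = r
--         return r
--
--     return f(len(s1), len(s2))
-- ===== Notes on version B (the rewrite author's own statement) =====
-- stated objective: alternative
-- what changed: Replaced the bottom-up (n+1)x(m+1) full-table DP sweep by a top-down memoized recursion f(i,j) with a dict memo, computing only the reachable subproblems.
import Mathlib
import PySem

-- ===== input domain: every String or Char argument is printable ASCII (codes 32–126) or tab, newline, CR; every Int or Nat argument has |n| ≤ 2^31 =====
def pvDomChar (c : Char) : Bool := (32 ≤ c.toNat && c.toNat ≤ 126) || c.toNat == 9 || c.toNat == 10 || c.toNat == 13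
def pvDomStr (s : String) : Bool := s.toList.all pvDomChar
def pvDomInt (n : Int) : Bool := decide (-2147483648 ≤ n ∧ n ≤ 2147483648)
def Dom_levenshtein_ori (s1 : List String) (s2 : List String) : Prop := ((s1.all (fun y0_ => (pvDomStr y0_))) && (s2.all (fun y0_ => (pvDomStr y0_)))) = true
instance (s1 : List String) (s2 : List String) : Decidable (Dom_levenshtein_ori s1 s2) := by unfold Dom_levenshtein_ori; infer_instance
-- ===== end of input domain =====

-- B replaces A's bottom-up full-table DP sweep by a top-down memoized recursion (same values; alternative decomposition).

-- ===== PORT A =====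
-- dp[i][j] read (A's indices are always in range) and dp[i][j] = v write:
def pvGet2 (dp : List (List Int)) (i j : Nat) : Int := (dp.getD i []).getD j 0
def pvSet2 (dp : List (List Int)) (i j : Nat) (v : Int) : List (List Int) :=
  dp.set i ((dp.getD i []).set j v)

-- literal port of A: build the (n+1)×(m+1) zero table, set the first column and first
-- row, then the nested loops (i = ii+1 runs 1..n, j = jj+1 runs 1..m); in the 'tau'
-- branch dp is left unchanged, exactly as in A (the min-update sits inside the else).
def levenshtein_ori (s1 : List String) (s2 : List String) : Int :=
  let n := s1.length
  let m := s2.length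
  let dp : List (List Int) := (List.range (n + 1)).map (fun _ => List.replicate (m + 1) (0 : Int))
  let dp := (List.range (n + 1)).foldl (fun dp i => pvSet2 dp i 0 (i : Int)) dp
  let dp := (List.range (m + 1)).foldl (fun dp j => pvSet2 dp 0 j (j : Int)) dp
  let dp := (List.range n).foldl (fun dp ii =>
    (List.range m).foldl (fun dp jj =>
      if s1.getD ii "" == "tau" || s2.getD jj "" == "tau" then dp
      else
        let cost : Int := if s1.getD ii "" == s2.getD jj "" then 0 else 1
        pvSet2 dp (ii + 1) (jj + 1)
          (min (min (pvGet2 dp ii (jj + 1) + 1) (pvGet2 dp (ii + 1) jj + 1))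
            (pvGet2 dp ii jj + cost))) dp) dp
  pvGet2 dp n m

-- ===== PORT B =====
-- memo dict (i, j) → value; f(i, j) exactly as in Source B, Python's evaluation order kept.
def pvFAlt (s1 s2 : List String) : Nat → Nat → PySem.Dict (Nat × Nat) Int → Int × PySem.Dict (Nat × Nat) Int
  | 0, j, memo => ((j : Int), memo)
  | i + 1, 0, memo => ((i + 1 : Nat), memo)
  | i + 1, j + 1, memo =>
    match memo.get? (i + 1, j + 1) with
    | some v => (v, memo)
    | none =>
      if s1.getD i "" == "tau" || s2.getD j "" == "tau" then
        ((0 : Int), memo.insert (i + 1, j + 1) 0)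
      else
        let p1 := pvFAlt s1 s2 i (j + 1) memo
        let p2 := pvFAlt s1 s2 (i + 1) j p1.2
        let cost : Int := if s1.getD i "" == s2.getD j "" then 0 else 1
        let p3 := pvFAlt s1 s2 i j p2.2
        let r := min (min (p1.1 + 1) (p2.1 + 1)) (p3.1 + cost)
        (r, p3.2.insert (i + 1, j + 1) r)
  termination_by i j _ => (i, j)

def levenshtein_ori_alt (s1 : List String) (s2 : List String) : Int :=
  (pvFAlt s1 s2 s1.length s2.length PySem.Dict.empty).1

-- ===== PRECONDITION & SPEC =====
def Spec_levenshtein_ori (s1 : List String) (s2 : List String) (out : Int) : Prop := out = levenshtein_ori_alt s1 s2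
instance (s1 : List String) (s2 : List String) (out : Int) : Decidable (Spec_levenshtein_ori s1 s2 out) := by unfold Spec_levenshtein_ori; infer_instance

-- ===== CLAIM (what is proved, stated in full; the proofs are below) =====
def Claim_equal_levenshtein_ori : Prop := ∀ (s1 : List String) (s2 : List String), Dom_levenshtein_ori s1 s2 → Spec_levenshtein_ori s1 s2 (levenshtein_ori s1 s2)

-- ===== LEMMAS AND PROOFS =====

def pvShape (dp : List (List Int)) (n m : Nat) : Prop :=
  dp.length = n + 1 ∧ ∀ r ∈ dp, r.length = m + 1

theorem pvRow_mem (dp : List (List Int)) (i : Nat) (h : i < dp.length) :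
    dp.getD i [] ∈ dp := by
  rw [List.getD_eq_getElem?_getD, List.getElem?_eq_getElem h]
  exact List.getElem_mem h

theorem pvShape_set2 (dp : List (List Int)) (n m i j : Nat) (v : Int)
    (h : pvShape dp n m) (hi : i ≤ n) : pvShape (pvSet2 dp i j v) n m := by
  obtain ⟨h1, h2⟩ := h
  refine ⟨by simpa [pvSet2] using h1, ?_⟩
  intro r hr
  rcases List.mem_or_eq_of_mem_set hr with hr' | rfl
  · exact h2 _ hr'
  · rw [List.length_set]
    exact h2 _ (pvRow_mem dp i (by omega))

theorem pvGet2_set2 (dp : List (List Int)) (n m i j a b : Nat) (v : Int)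
    (h : pvShape dp n m) (hi : i ≤ n) (hj : j ≤ m) :
    pvGet2 (pvSet2 dp i j v) a b = if a = i ∧ b = j then v else pvGet2 dp a b := by
  obtain ⟨h1, h2⟩ := h
  have hil : i < dp.length := by omega
  have hrl : (dp.getD i []).length = m + 1 := h2 _ (pvRow_mem dp i hil)
  have hrl' : (dp[i]?.getD []).length = m + 1 := by
    rw [← List.getD_eq_getElem?_getD]; exact hrl
  have hjl : j < (dp[i]?.getD []).length := by omega
  by_cases ha : i = a <;> by_cases hb : j = b
  · subst ha; subst hb
    have hjl2 : j < dp[i].length := by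
      have : dp[i]?.getD [] = dp[i] := by rw [List.getElem?_eq_getElem hil]; rfl
      rw [this] at hjl; exact hjl
    simp [pvGet2, pvSet2, List.getD_eq_getElem?_getD, hil, hjl2]
  · subst ha
    simp [pvGet2, pvSet2, List.getD_eq_getElem?_getD, hil, hb, Ne.symm hb]
  · subst hb
    simp [pvGet2, pvSet2, List.getD_eq_getElem?_getD, ha, Ne.symm ha]
  · simp [pvGet2, pvSet2, List.getD_eq_getElem?_getD, ha, Ne.symm ha]

def pvL (s1 s2 : List String) : Nat → Nat → Int
  | 0, j => (j : Int)
  | i + 1, 0 => ((i + 1 : Nat) : Int)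
  | i + 1, j + 1 =>
    if s1.getD i "" == "tau" || s2.getD j "" == "tau" then 0
    else
      min (min (pvL s1 s2 i (j + 1) + 1) (pvL s1 s2 (i + 1) j + 1))
        (pvL s1 s2 i j + (if s1.getD i "" == s2.getD j "" then 0 else 1))
  termination_by i j => (i, j)

theorem pvL_zero_left (s1 s2 : List String) (j : Nat) : pvL s1 s2 0 j = (j : Int) := by
  rw [pvL]

theorem pvL_zero_right (s1 s2 : List String) (i : Nat) : pvL s1 s2 i 0 = (i : Int) := by
  cases i <;> rw [pvL]

theorem pvShape_init (n m : Nat) :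
    pvShape ((List.range (n+1)).map (fun _ => List.replicate (m+1) (0:Int))) n m := by
  constructor
  · simp
  · intro r hr
    simp only [List.mem_map] at hr
    obtain ⟨_, _, rfl⟩ := hr
    simp

theorem pvGet2_init (n m a b : Nat) :
    pvGet2 ((List.range (n+1)).map (fun _ => List.replicate (m+1) (0:Int))) a b = 0 := by
  unfold pvGet2
  rcases lt_or_ge a (n+1) with h | h
  · have hrow : ((List.range (n+1)).map (fun _ => List.replicate (m+1) (0:Int))).getD a []
        = List.replicate (m+1) (0:Int) := by
      rw [List.getD_eq_getElem?_getD, List.getElem?_map, List.getElem?_eq_getElem (by simpa using h)]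
      simp
    rw [hrow]
    rcases le_or_gt b m with hb | hb
    · simp [List.getD_eq_getElem?_getD, hb]
    · simp [List.getD_eq_getElem?_getD, not_le.mpr hb]
  · have hrow : ((List.range (n+1)).map (fun _ => List.replicate (m+1) (0:Int))).getD a [] = [] := by
      rw [List.getD_eq_getElem?_getD, List.getElem?_eq_none (by simpa using h)]
      rfl
    rw [hrow]
    simp

theorem pvFold1 (n m k : Nat) (hk : k ≤ n + 1) :
    pvShape ((List.range k).foldl (fun dp i => pvSet2 dp i 0 (i : Int))
      ((List.range (n+1)).map (fun _ => List.replicate (m+1) (0:Int)))) n m ∧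
    ∀ a b, pvGet2 ((List.range k).foldl (fun dp i => pvSet2 dp i 0 (i : Int))
      ((List.range (n+1)).map (fun _ => List.replicate (m+1) (0:Int)))) a b
      = if a < k ∧ b = 0 then (a : Int) else 0 := by
  induction k with
  | zero =>
    rw [List.range_zero]
    exact ⟨pvShape_init n m, fun a b => by rw [List.foldl_nil, pvGet2_init]; simp⟩
  | succ k ih =>
    obtain ⟨ihs, ihg⟩ := ih (by omega)
    rw [show List.range (k+1) = List.range k ++ [k] from List.range_succ,
      List.foldl_append, List.foldl_cons, List.foldl_nil]
    refine ⟨pvShape_set2 _ n m _ _ _ ihs (by omega), ?_⟩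
    intro a b
    rw [pvGet2_set2 _ n m _ _ _ _ _ ihs (by omega) (by omega), ihg]
    split_ifs <;> omega

theorem pvFold2 (n m : Nat) (dp1 : List (List Int)) (hsh : pvShape dp1 n m)
    (hch : ∀ a b, pvGet2 dp1 a b = if a ≤ n ∧ b = 0 then (a : Int) else 0)
    (t : Nat) (ht : t ≤ m + 1) :
    pvShape ((List.range t).foldl (fun dp j => pvSet2 dp 0 j (j : Int)) dp1) n m ∧
    ∀ a b, pvGet2 ((List.range t).foldl (fun dp j => pvSet2 dp 0 j (j : Int)) dp1) a b
      = if a = 0 ∧ b < t then (b : Int)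
        else if a ≤ n ∧ b = 0 then (a : Int) else 0 := by
  induction t with
  | zero =>
    rw [List.range_zero]
    refine ⟨hsh, fun a b => ?_⟩
    rw [List.foldl_nil, hch]
    split_ifs <;> omega
  | succ t ih =>
    obtain ⟨ihs, ihg⟩ := ih (by omega)
    rw [show List.range (t+1) = List.range t ++ [t] from List.range_succ,
      List.foldl_append, List.foldl_cons, List.foldl_nil]
    refine ⟨pvShape_set2 _ n m _ _ _ ihs (by omega), ?_⟩
    intro a b
    rw [pvGet2_set2 _ n m _ _ _ _ _ ihs (by omega) (by omega), ihg]
    split_ifs <;> simp_all <;> omega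

theorem pvInner (s1 s2 : List String) (n m ii : Nat) (hii : ii < n)
    (dp : List (List Int)) (hsh : pvShape dp n m)
    (hprev : ∀ b, b ≤ m → pvGet2 dp ii b = pvL s1 s2 ii b)
    (hrow0 : pvGet2 dp (ii+1) 0 = ((ii+1 : Nat) : Int))
    (hrow : ∀ b, 1 ≤ b → b ≤ m → pvGet2 dp (ii+1) b = 0)
    (t : Nat) (ht : t ≤ m) :
    pvShape ((List.range t).foldl (fun dp jj =>
      if s1.getD ii "" == "tau" || s2.getD jj "" == "tau" then dp
      else
        let cost : Int := if s1.getD ii "" == s2.getD jj "" then 0 else 1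
        pvSet2 dp (ii + 1) (jj + 1)
          (min (min (pvGet2 dp ii (jj + 1) + 1) (pvGet2 dp (ii + 1) jj + 1))
            (pvGet2 dp ii jj + cost))) dp) n m ∧
    (∀ a b, a ≠ ii + 1 → pvGet2 ((List.range t).foldl (fun dp jj =>
      if s1.getD ii "" == "tau" || s2.getD jj "" == "tau" then dp
      else
        let cost : Int := if s1.getD ii "" == s2.getD jj "" then 0 else 1
        pvSet2 dp (ii + 1) (jj + 1)
          (min (min (pvGet2 dp ii (jj + 1) + 1) (pvGet2 dp (ii + 1) jj + 1))
            (pvGet2 dp ii jj + cost))) dp) a b = pvGet2 dp a b) ∧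
    (∀ b, b ≤ m → pvGet2 ((List.range t).foldl (fun dp jj =>
      if s1.getD ii "" == "tau" || s2.getD jj "" == "tau" then dp
      else
        let cost : Int := if s1.getD ii "" == s2.getD jj "" then 0 else 1
        pvSet2 dp (ii + 1) (jj + 1)
          (min (min (pvGet2 dp ii (jj + 1) + 1) (pvGet2 dp (ii + 1) jj + 1))
            (pvGet2 dp ii jj + cost))) dp) (ii+1) b
      = if b ≤ t then pvL s1 s2 (ii+1) b else pvGet2 dp (ii+1) b) := by
  induction t with
  | zero =>
    rw [List.range_zero]
    refine ⟨by simpa using hsh, by simp, fun b hb => ?_⟩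
    rw [List.foldl_nil]
    split_ifs with h
    · have : b = 0 := by omega
      subst this
      rw [hrow0, pvL_zero_right]
    · rfl
  | succ t ih =>
    obtain ⟨ihs, ihother, ihrow⟩ := ih (by omega)
    rw [show List.range (t+1) = List.range t ++ [t] from List.range_succ,
      List.foldl_append, List.foldl_cons, List.foldl_nil]
    by_cases htau : (s1.getD ii "" == "tau" || s2.getD t "" == "tau") = true
    · rw [if_pos htau]
      refine ⟨ihs, ihother, fun b hb => ?_⟩
      rw [ihrow b hb]
      rcases Nat.lt_trichotomy b (t+1) with h | h | h
      · rw [if_pos (by omega), if_pos (by omega)]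
      · subst h
        rw [if_neg (by omega), if_pos (by omega)]
        rw [hrow (t+1) (by omega) hb]
        rw [pvL]
        rw [if_pos htau]
      · rw [if_neg (by omega), if_neg (by omega)]
    · rw [if_neg htau]
      have hval : min (min (pvGet2 ((List.range t).foldl (fun dp jj =>
      if s1.getD ii "" == "tau" || s2.getD jj "" == "tau" then dp
      else
        let cost : Int := if s1.getD ii "" == s2.getD jj "" then 0 else 1
        pvSet2 dp (ii + 1) (jj + 1)
          (min (min (pvGet2 dp ii (jj + 1) + 1) (pvGet2 dp (ii + 1) jj + 1))
            (pvGet2 dp ii jj + cost))) dp) ii (t + 1) + 1)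
            (pvGet2 ((List.range t).foldl (fun dp jj =>
      if s1.getD ii "" == "tau" || s2.getD jj "" == "tau" then dp
      else
        let cost : Int := if s1.getD ii "" == s2.getD jj "" then 0 else 1
        pvSet2 dp (ii + 1) (jj + 1)
          (min (min (pvGet2 dp ii (jj + 1) + 1) (pvGet2 dp (ii + 1) jj + 1))
            (pvGet2 dp ii jj + cost))) dp) (ii + 1) t + 1))
            (pvGet2 ((List.range t).foldl (fun dp jj =>
      if s1.getD ii "" == "tau" || s2.getD jj "" == "tau" then dp
      else
        let cost : Int := if s1.getD ii "" == s2.getD jj "" then 0 else 1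
        pvSet2 dp (ii + 1) (jj + 1)
          (min (min (pvGet2 dp ii (jj + 1) + 1) (pvGet2 dp (ii + 1) jj + 1))
            (pvGet2 dp ii jj + cost))) dp) ii t +
              (if s1.getD ii "" == s2.getD t "" then (0:Int) else 1))
          = pvL s1 s2 (ii+1) (t+1) := by
        rw [ihother ii (t+1) (by omega), ihother ii t (by omega),
          hprev (t+1) (by omega), hprev t (by omega),
          ihrow t (by omega), if_pos (le_refl t)]
        conv_rhs => rw [pvL]
        rw [if_neg htau]
      refine ⟨pvShape_set2 _ n m _ _ _ ihs (by omega), ?_, ?_⟩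
      · intro a b ha
        rw [pvGet2_set2 _ n m _ _ _ _ _ ihs (by omega) (by omega),
          if_neg (by tauto), ihother a b ha]
      · intro b hb
        rw [pvGet2_set2 _ n m _ _ _ _ _ ihs (by omega) (by omega)]
        rcases Nat.lt_trichotomy b (t+1) with h | h | h
        · rw [if_neg (by omega), ihrow b hb, if_pos (by omega), if_pos (by omega)]
        · subst h
          rw [if_pos ⟨rfl, rfl⟩]
          conv_rhs => rw [if_pos (show t+1 ≤ t+1 from le_refl _)]
          exact hval
        · rw [if_neg (by omega), ihrow b hb, if_neg (by omega), if_neg (by omega)]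

theorem pvOuter (s1 s2 : List String) (n m : Nat) (dp2 : List (List Int))
    (hsh : pvShape dp2 n m)
    (hinit : ∀ a b, pvGet2 dp2 a b
      = if a = 0 ∧ b < m + 1 then (b : Int)
        else if a ≤ n ∧ b = 0 then (a : Int) else 0)
    (k : Nat) (hk : k ≤ n) :
    pvShape ((List.range k).foldl (fun dp ii =>
      (List.range m).foldl (fun dp jj =>
        if s1.getD ii "" == "tau" || s2.getD jj "" == "tau" then dp
        else
          let cost : Int := if s1.getD ii "" == s2.getD jj "" then 0 else 1
          pvSet2 dp (ii + 1) (jj + 1)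
            (min (min (pvGet2 dp ii (jj + 1) + 1) (pvGet2 dp (ii + 1) jj + 1))
              (pvGet2 dp ii jj + cost))) dp) dp2) n m ∧
    (∀ a b, a ≤ k → b ≤ m → pvGet2 ((List.range k).foldl (fun dp ii =>
      (List.range m).foldl (fun dp jj =>
        if s1.getD ii "" == "tau" || s2.getD jj "" == "tau" then dp
        else
          let cost : Int := if s1.getD ii "" == s2.getD jj "" then 0 else 1
          pvSet2 dp (ii + 1) (jj + 1)
            (min (min (pvGet2 dp ii (jj + 1) + 1) (pvGet2 dp (ii + 1) jj + 1))
              (pvGet2 dp ii jj + cost))) dp) dp2) a b = pvL s1 s2 a b) ∧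
    (∀ a b, k < a → pvGet2 ((List.range k).foldl (fun dp ii =>
      (List.range m).foldl (fun dp jj =>
        if s1.getD ii "" == "tau" || s2.getD jj "" == "tau" then dp
        else
          let cost : Int := if s1.getD ii "" == s2.getD jj "" then 0 else 1
          pvSet2 dp (ii + 1) (jj + 1)
            (min (min (pvGet2 dp ii (jj + 1) + 1) (pvGet2 dp (ii + 1) jj + 1))
              (pvGet2 dp ii jj + cost))) dp) dp2) a b = pvGet2 dp2 a b) := by
  induction k with
  | zero =>
    rw [List.range_zero]
    refine ⟨by simpa using hsh, fun a b ha hb => ?_, by simp⟩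
    rw [List.foldl_nil, hinit]
    have : a = 0 := by omega
    subst this
    rw [if_pos ⟨rfl, by omega⟩, pvL_zero_left]
  | succ k ih =>
    obtain ⟨ihs, ihdone, ihrest⟩ := ih (by omega)
    rw [show List.range (k+1) = List.range k ++ [k] from List.range_succ,
      List.foldl_append, List.foldl_cons, List.foldl_nil]
    have hprev : ∀ b, b ≤ m → pvGet2 ((List.range k).foldl (fun dp ii =>
      (List.range m).foldl (fun dp jj =>
        if s1.getD ii "" == "tau" || s2.getD jj "" == "tau" then dp
        else
          let cost : Int := if s1.getD ii "" == s2.getD jj "" then 0 else 1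
          pvSet2 dp (ii + 1) (jj + 1)
            (min (min (pvGet2 dp ii (jj + 1) + 1) (pvGet2 dp (ii + 1) jj + 1))
              (pvGet2 dp ii jj + cost))) dp) dp2) k b = pvL s1 s2 k b :=
      fun b hb => ihdone k b (le_refl k) hb
    have hrow0 : pvGet2 ((List.range k).foldl (fun dp ii =>
      (List.range m).foldl (fun dp jj =>
        if s1.getD ii "" == "tau" || s2.getD jj "" == "tau" then dp
        else
          let cost : Int := if s1.getD ii "" == s2.getD jj "" then 0 else 1
          pvSet2 dp (ii + 1) (jj + 1)
            (min (min (pvGet2 dp ii (jj + 1) + 1) (pvGet2 dp (ii + 1) jj + 1))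
              (pvGet2 dp ii jj + cost))) dp) dp2) (k+1) 0 = ((k+1 : Nat) : Int) := by
      rw [ihrest (k+1) 0 (by omega), hinit, if_neg (by omega), if_pos ⟨by omega, rfl⟩]
    have hrow : ∀ b, 1 ≤ b → b ≤ m → pvGet2 ((List.range k).foldl (fun dp ii =>
      (List.range m).foldl (fun dp jj =>
        if s1.getD ii "" == "tau" || s2.getD jj "" == "tau" then dp
        else
          let cost : Int := if s1.getD ii "" == s2.getD jj "" then 0 else 1
          pvSet2 dp (ii + 1) (jj + 1)
            (min (min (pvGet2 dp ii (jj + 1) + 1) (pvGet2 dp (ii + 1) jj + 1))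
              (pvGet2 dp ii jj + cost))) dp) dp2) (k+1) b = 0 := by
      intro b h1 h2
      rw [ihrest (k+1) b (by omega), hinit, if_neg (by omega), if_neg (by omega)]
    obtain ⟨hs', hother', hrow'⟩ := pvInner s1 s2 n m k (by omega) _ ihs hprev hrow0 hrow m (le_refl m)
    refine ⟨hs', fun a b ha hb => ?_, fun a b ha => ?_⟩
    · rcases Nat.lt_trichotomy a (k+1) with h | h | h
      · rw [hother' a b (by omega), ihdone a b (by omega) hb]
      · subst h
        rw [hrow' b hb, if_pos hb]
      · omega
    · rw [hother' a b (by omega), ihrest a b (by omega)]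

def pvMemoOK (s1 s2 : List String) (memo : PySem.Dict (Nat × Nat) Int) : Prop :=
  ∀ i j v, memo.get? (i, j) = some v → v = pvL s1 s2 i j

theorem pvFAlt_correct (s1 s2 : List String) (i j : Nat) (memo : PySem.Dict (Nat × Nat) Int)
    (h : pvMemoOK s1 s2 memo) :
    (pvFAlt s1 s2 i j memo).1 = pvL s1 s2 i j ∧ pvMemoOK s1 s2 (pvFAlt s1 s2 i j memo).2 := by
  induction i, j, memo using pvFAlt.induct s1 s2 with
  | case1 j memo => simpa [pvFAlt, pvL] using h
  | case2 i memo => simpa [pvFAlt, pvL] using h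
  | case3 i j memo v hv =>
    refine ⟨?_, ?_⟩
    · simp [pvFAlt, hv, h _ _ _ hv, pvL]
    · simp [pvFAlt, hv]; exact h
  | case4 i j memo hv htau =>
    have htau' : s1[i]?.getD "" = "tau" ∨ s2[j]?.getD "" = "tau" := by
      simpa [List.getD] using htau
    have hsim : pvFAlt s1 s2 (i+1) (j+1) memo = (0, memo.insert (i+1,j+1) 0) := by
      simp [pvFAlt, hv, htau']
    rw [hsim]
    constructor
    · simp [pvL, List.getD, htau']
    · intro a b w hw
      rw [PySem.Dict.get?_insert] at hw
      split at hw
      · rename_i heq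
        obtain ⟨rfl, rfl⟩ : a = i + 1 ∧ b = j + 1 := by simpa [Prod.ext_iff] using heq
        obtain rfl := (Option.some.inj hw).symm
        simp [pvL, List.getD, htau']
      · exact h _ _ _ hw
  | case5 i j memo hnone hnt p1d p2d ihA ihB ih2 ih3 =>
    have H1 := ihA h
    have H2 := ih2 H1.2
    have H3 := ih3 H2.2
    have hval : min (min ((pvFAlt s1 s2 i (j+1) memo).1 + 1)
          ((pvFAlt s1 s2 (i+1) j (pvFAlt s1 s2 i (j+1) memo).2).1 + 1))
          ((pvFAlt s1 s2 i j (pvFAlt s1 s2 (i+1) j (pvFAlt s1 s2 i (j+1) memo).2).2).1 +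
            (if s1.getD i "" == s2.getD j "" then (0:Int) else 1)) = pvL s1 s2 (i+1) (j+1) := by
      rw [H1.1, H2.1, H3.1]
      conv_rhs => rw [pvL]
      rw [if_neg hnt]
    simp only [pvFAlt, hnone]
    rw [if_neg hnt]
    refine ⟨hval, ?_⟩
    intro a b w hw
    simp only at hw
    rw [PySem.Dict.get?_insert] at hw
    split at hw
    · rename_i heq
      obtain ⟨rfl, rfl⟩ : a = i + 1 ∧ b = j + 1 := by simpa [Prod.ext_iff] using heq
      obtain rfl := (Option.some.inj hw).symm
      exact hval.symm ▸ rfl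
    · exact H3.2 _ _ _ hw

theorem levenshtein_ori_eq_pvL (s1 s2 : List String) :
    levenshtein_ori s1 s2 = pvL s1 s2 s1.length s2.length := by
  obtain ⟨h1s, h1g⟩ := pvFold1 s1.length s2.length (s1.length + 1) (le_refl _)
  have hch : ∀ a b, pvGet2 ((List.range (s1.length + 1)).foldl (fun dp i => pvSet2 dp i 0 (i : Int))
      ((List.range (s1.length + 1)).map (fun _ => List.replicate (s2.length + 1) (0 : Int)))) a b
      = if a ≤ s1.length ∧ b = 0 then (a : Int) else 0 := by
    intro a b
    rw [h1g]
    split_ifs <;> first | rfl | omega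
  obtain ⟨h2s, h2g⟩ := pvFold2 s1.length s2.length _ h1s hch (s2.length + 1) (le_refl _)
  obtain ⟨_, hdone, _⟩ := pvOuter s1 s2 s1.length s2.length _ h2s h2g s1.length (le_refl _)
  exact hdone s1.length s2.length (le_refl _) (le_refl _)

theorem levenshtein_ori_alt_eq_pvL (s1 s2 : List String) :
    levenshtein_ori_alt s1 s2 = pvL s1 s2 s1.length s2.length := by
  have hempty : pvMemoOK s1 s2 PySem.Dict.empty := by
    intro i j v h
    rw [PySem.Dict.get?_empty] at h
    cases h
  exact (pvFAlt_correct s1 s2 s1.length s2.length PySem.Dict.empty hempty).1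

-- ===== VERDICT (by name: the statement is the Claim_ definition above) =====
theorem levenshtein_ori_spec : Claim_equal_levenshtein_ori := by
  intro s1 s2 _
  unfold Spec_levenshtein_ori
  rw [levenshtein_ori_eq_pvL, levenshtein_ori_alt_eq_pvL]
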